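-- pv_equiv track=rewrite | github.com/hsjinde/Traing-phase-Enhancing-SPARQL-Query-Performance-With-Recurrent-Neural-Networks | AutotagTarget.py | GetSPO
-- ===== SOURCE A (Python) =====
-- def GetSPO(subquery):
--     temp = []
--     count = 0
--     subspo = subquery.split()
--     for i in range(len(subspo)):
--         if subspo[i] =="." or subspo[i] ==";":
--             continue
--         if "?" in subspo[i]:
--             delperiod = ''
--             for j in subspo[i]:
--                 if j != ".":
--                     delperiod = delperiod+j
--             temp.append(delperiod)
--             count +=1
--         else :
--             if count%3 == 0:
--                 temp.append("S")
--             if count%3 == 1: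
--                     temp.append("P")
--             if count%3 == 2:
--                 temp.append("O")
--             count +=1
--     return temp
-- ===== SOURCE B (Python) =====
-- def GetSPO(subquery):
--     def go(tokens, labels):
--         if not tokens:
--             return []
--         t, rest = tokens[0], tokens[1:]
--         if t == "." or t == ";":
--             return go(rest, labels)
--         out = t.replace(".", "") if "?" in t else labels[0]
--         return [out] + go(rest, labels[1:] + labels[:1])
--     return go(subquery.split(), ["S", "P", "O"])
-- ===== Notes on version B (the rewrite author's own statement) =====
-- stated objective: simpler
-- what changed: Replaces A's iterative loop over token indices with a manually maintained modular counter and three sequential if-branches by a structural recursion over the token list that carries a rotating label list ['S','P','O'] (head = next tag, rotated after every emitted token), eliminating the counter and the mod-3 arithmetic entirely; the period-stripping character loop becomes str.replace.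
import Mathlib
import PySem

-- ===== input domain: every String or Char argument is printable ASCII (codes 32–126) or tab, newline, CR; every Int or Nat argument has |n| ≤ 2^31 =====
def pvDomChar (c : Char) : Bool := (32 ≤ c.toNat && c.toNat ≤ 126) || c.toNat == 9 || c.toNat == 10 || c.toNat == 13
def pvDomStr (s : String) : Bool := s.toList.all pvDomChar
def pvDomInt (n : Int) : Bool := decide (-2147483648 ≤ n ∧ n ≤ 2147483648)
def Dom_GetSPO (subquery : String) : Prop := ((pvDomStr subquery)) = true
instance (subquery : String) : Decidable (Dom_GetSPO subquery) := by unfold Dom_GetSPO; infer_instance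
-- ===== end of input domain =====

-- B replaces A's iterative counting loop (count % 3 with three sequential if-branches and a
-- hand-built delperiod string) by a structural recursion over the token list carrying a rotating
-- label list ["S","P","O"] — no counter at all (objective: simpler).


-- ===== PORT A =====
def GetSPO (subquery : String) : List String :=
  let subspo := PySem.Str.split₀ subquery
  ((PySem.List.pyRange 0 (subspo.length : Int) 1).foldl
    (fun (st : List String × Int) i =>
      let tok := PySem.List.pyGetD subspo i ""
      if tok == "." || tok == ";" then st
      else if PySem.Str.isIn "?" tok then
        let delperiod := tok.toList.foldl (fun acc j => if j != '.' then acc.push j else acc) ""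
        (st.1 ++ [delperiod], st.2 + 1)
      else
        let t1 := if PySem.Int.mod st.2 3 == 0 then st.1 ++ ["S"] else st.1
        let t2 := if PySem.Int.mod st.2 3 == 1 then t1 ++ ["P"] else t1
        let t3 := if PySem.Int.mod st.2 3 == 2 then t2 ++ ["O"] else t2
        (t3, st.2 + 1))
    ([], 0)).1

-- ===== PORT B =====
-- recursive helper 'go' of Source B: consume the token list, rotating the label list on every
-- emitted token ('labels[0]' is ported as headD "" — go is only ever called with 3 labels)
def GetSPOgo : List String → List String → List String
  | [], _ => []
  | t :: rest, labels =>
    if t == "." || t == ";" then GetSPOgo rest labels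
    else if PySem.Str.isIn "?" t then
      PySem.Str.replace t "." "" :: GetSPOgo rest (labels.drop 1 ++ labels.take 1)
    else
      labels.headD "" :: GetSPOgo rest (labels.drop 1 ++ labels.take 1)

def GetSPO_alt (subquery : String) : List String :=
  GetSPOgo (PySem.Str.split₀ subquery) ["S", "P", "O"]

-- ===== PRECONDITION & SPEC =====
def Spec_GetSPO (subquery : String) (out : List String) : Prop := out = GetSPO_alt subquery
instance (subquery : String) (out : List String) : Decidable (Spec_GetSPO subquery out) := by unfold Spec_GetSPO; infer_instance

-- ===== CLAIM (what is proved, stated in full; the proofs are below) =====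
def Claim_equal_GetSPO : Prop := ∀ (subquery : String), Dom_GetSPO subquery → Spec_GetSPO subquery (GetSPO subquery)

-- ===== LEMMAS AND PROOFS =====

-- the label rotation of B as a function of A's counter value mod 3 (proof-only helper)
def rotLabels (m : Int) : List String :=
  if m == 0 then ["S", "P", "O"] else if m == 1 then ["P", "O", "S"] else ["O", "S", "P"]

-- A's character loop appends exactly the non-'.' characters
theorem foldl_push_toList (l : List Char) (s : String) :
    (l.foldl (fun acc j => if j != '.' then acc.push j else acc) s).toList
      = s.toList ++ l.filter (fun j => j != '.') := by
  induction l generalizing s with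
  | nil => simp
  | cons c t ih =>
    rw [List.foldl_cons]
    by_cases h : c = '.'
    · subst h
      rw [if_neg (by simp), ih]
      simp
    · rw [if_pos (by simp [h]), ih]
      simp [h, String.toList_push]

-- single-char replace with "" is a filter
theorem replace_go_filter (fuel : Nat) (l acc : List Char) (h : l.length ≤ fuel) :
    PySem.Chars.replace.go ['.'] [] fuel l acc
      = acc.reverse ++ l.filter (fun j => j != '.') := by
  induction fuel generalizing l acc with
  | zero =>
    have : l = [] := by cases l <;> simp_all
    subst this; simp [PySem.Chars.replace.go]
  | succ n ih =>
    cases l with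
    | nil => simp [PySem.Chars.replace.go]
    | cons c t =>
      by_cases h' : c = '.'
      · subst h'
        have hp : List.isPrefixOf ['.'] ('.' :: t) = true := by simp [List.isPrefixOf]
        simp only [PySem.Chars.replace.go, hp, if_pos, List.length_cons, List.length_nil,
          Nat.zero_add, List.drop_succ_cons, List.drop_zero, List.reverse_nil, List.nil_append]
        rw [ih t acc (by simpa using h)]
        simp only [List.filter_cons, bne_self_eq_false, Bool.false_eq_true, if_false]
      · have hp : List.isPrefixOf ['.'] (c :: t) = false := by
          simp only [List.isPrefixOf, Bool.and_eq_false_iff, beq_eq_false_iff_ne]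
          exact Or.inl fun hh => h' hh.symm
        simp only [PySem.Chars.replace.go, hp, Bool.false_eq_true, if_false]
        rw [ih t (c :: acc) (by simpa using h)]
        simp [h']

-- A's delperiod loop computes B's tok.replace(".", "")
theorem delperiod_eq (tok : String) :
    tok.toList.foldl (fun acc j => if j != '.' then acc.push j else acc) ""
      = PySem.Str.replace tok "." "" := by
  apply String.toList_inj.mp
  rw [foldl_push_toList, PySem.Str.toList_replace]
  rw [show (".".toList) = ['.'] from rfl, show ("".toList) = ([] : List Char) from rfl]
  unfold PySem.Chars.replace
  rw [if_neg (by simp)]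
  rw [replace_go_filter tok.toList.length tok.toList [] le_rfl]
  rfl

-- main loop invariant: A's fold from (acc, c) is acc ++ B's recursion with the labels rotated by c
theorem loop_eq (l : List String) (acc : List String) (c : Int) :
    (l.foldl
      (fun (st : List String × Int) tok =>
        if tok == "." || tok == ";" then st
        else if PySem.Str.isIn "?" tok then
          (st.1 ++ [tok.toList.foldl (fun acc j => if j != '.' then acc.push j else acc) ""], st.2 + 1)
        else
          ((if PySem.Int.mod st.2 3 == 2 then
              (if PySem.Int.mod st.2 3 == 1 then
                (if PySem.Int.mod st.2 3 == 0 then st.1 ++ ["S"] else st.1) ++ ["P"]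
               else (if PySem.Int.mod st.2 3 == 0 then st.1 ++ ["S"] else st.1)) ++ ["O"]
            else
              (if PySem.Int.mod st.2 3 == 1 then
                (if PySem.Int.mod st.2 3 == 0 then st.1 ++ ["S"] else st.1) ++ ["P"]
               else (if PySem.Int.mod st.2 3 == 0 then st.1 ++ ["S"] else st.1))), st.2 + 1))
      (acc, c)).1
    = acc ++ GetSPOgo l (rotLabels (PySem.Int.mod c 3)) := by
  induction l generalizing acc c with
  | nil => simp [GetSPOgo]
  | cons tok rest ih =>
    have hmod : PySem.Int.mod c 3 = c % 3 := PySem.Int.mod_eq_emod_of_pos (by norm_num)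
    have hmod1 : PySem.Int.mod (c + 1) 3 = (c + 1) % 3 := PySem.Int.mod_eq_emod_of_pos (by norm_num)
    have hc : c % 3 = 0 ∨ c % 3 = 1 ∨ c % 3 = 2 := by omega
    by_cases hskip : tok = "." ∨ tok = ";"
    · have h1 : (tok == "." || tok == ";") = true := by
        rcases hskip with h | h <;> simp [h]
      simp only [List.foldl_cons, if_pos, GetSPOgo, h1]
      exact ih acc c
    · rw [not_or] at hskip
      have h1 : (tok == "." || tok == ";") = false := by simp [hskip.1, hskip.2]
      have hrot : rotLabels (PySem.Int.mod (c + 1) 3)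
          = (rotLabels (PySem.Int.mod c 3)).drop 1 ++ (rotLabels (PySem.Int.mod c 3)).take 1 := by
        rw [hmod, hmod1]
        rcases hc with h | h | h <;>
          · have h' : (c + 1) % 3 = (c % 3 + 1) % 3 := by omega
            rw [h', h]; rfl
      by_cases hq : PySem.Str.isIn "?" tok = true
      · simp only [List.foldl_cons, h1, Bool.false_eq_true, if_false, hq, if_pos, GetSPOgo]
        rw [ih, delperiod_eq, hrot]
        simp
      · have hq' : PySem.Str.isIn "?" tok = false := by simpa using hq
        simp only [List.foldl_cons, h1, Bool.false_eq_true, if_false, hq', GetSPOgo]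
        rw [ih, hrot]
        have hhead : (if PySem.Int.mod c 3 == 2 then
              (if PySem.Int.mod c 3 == 1 then
                (if PySem.Int.mod c 3 == 0 then acc ++ ["S"] else acc) ++ ["P"]
               else (if PySem.Int.mod c 3 == 0 then acc ++ ["S"] else acc)) ++ ["O"]
            else
              (if PySem.Int.mod c 3 == 1 then
                (if PySem.Int.mod c 3 == 0 then acc ++ ["S"] else acc) ++ ["P"]
               else (if PySem.Int.mod c 3 == 0 then acc ++ ["S"] else acc)))
            = acc ++ [(rotLabels (PySem.Int.mod c 3)).headD ""] := by
          rw [hmod]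
          rcases hc with h | h | h <;> simp [h, rotLabels]
        rw [hhead]
        simp

-- ===== VERDICT (by name: the statement is the Claim_ definition above) =====
theorem GetSPO_spec : Claim_equal_GetSPO := by
  intro subquery _
  unfold Spec_GetSPO GetSPO GetSPO_alt
  simp only []
  rw [PySem.List.foldl_pyRange_zero_pyGetD' (PySem.Str.split₀ subquery) ""
    (fun (st : List String × Int) tok =>
      if tok == "." || tok == ";" then st
      else if PySem.Str.isIn "?" tok then
        (st.1 ++ [tok.toList.foldl (fun acc j => if j != '.' then acc.push j else acc) ""], st.2 + 1)
      else
        ((if PySem.Int.mod st.2 3 == 2 then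
            (if PySem.Int.mod st.2 3 == 1 then
              (if PySem.Int.mod st.2 3 == 0 then st.1 ++ ["S"] else st.1) ++ ["P"]
             else (if PySem.Int.mod st.2 3 == 0 then st.1 ++ ["S"] else st.1)) ++ ["O"]
          else
            (if PySem.Int.mod st.2 3 == 1 then
              (if PySem.Int.mod st.2 3 == 0 then st.1 ++ ["S"] else st.1) ++ ["P"]
             else (if PySem.Int.mod st.2 3 == 0 then st.1 ++ ["S"] else st.1))), st.2 + 1))
    ([], 0)]
  rw [loop_eq]
  rfl
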